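-- pv_equiv track=rewrite | github.com/omegaestable/magma-ai | mine_v26d_magmas.py | describe_magma
-- ===== SOURCE A (Python) =====
-- def describe_magma(table: list[list[int]]) -> str:
--     """Try to find a simple verbal rule for a magma."""
--     size = len(table)
--     # Check if it's a*b = constant
--     flat = [table[i][j] for i in range(size) for j in range(size)]
--     if len(set(flat)) == 1:
--         return f"a*b = {flat[0]}"
--
--     # Check a*b = a (left projection)
--     if all(table[i][j] == i for i in range(size) for j in range(size)):
--         return "a*b = a"
--
--     # Check a*b = b (right projection)
--     if all(table[i][j] == j for i in range(size) for j in range(size)):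
--         return "a*b = b"
--
--     # Check a*b = (a+b) mod size
--     if all(table[i][j] == (i+j) % size for i in range(size) for j in range(size)):
--         return f"a*b = (a+b) mod {size}"
--
--     # Check a*b = (a+1) mod size (left shift, ignore b)
--     if all(table[i][j] == (i+1) % size for i in range(size) for j in range(size)):
--         return f"a*b = (a+1) mod {size} [T3L]"
--
--     # Check a*b = (b+1) mod size (right shift, ignore a)
--     if all(table[i][j] == (j+1) % size for i in range(size) for j in range(size)):
--         return f"a*b = (b+1) mod {size} [T3R]"
--
--     # Check a*b = (a*b) mod size (regular multiplication)
--     if all(table[i][j] == (i*j) % size for i in range(size) for j in range(size)):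
--         return f"a*b = a×b mod {size}"
--
--     # Check for XOR pattern (size=2)
--     if size == 2 and table == [[0,1],[1,0]]:
--         return "a*b = a XOR b"
--
--     # Check a*b = max(a,b) or min(a,b)
--     if all(table[i][j] == max(i,j) for i in range(size) for j in range(size)):
--         return "a*b = max(a,b)"
--     if all(table[i][j] == min(i,j) for i in range(size) for j in range(size)):
--         return "a*b = min(a,b)"
--
--     # Describe sparsely: how many non-zero entries?
--     nonzero = sum(1 for i in range(size) for j in range(size) if table[i][j] != 0)
--     if nonzero <= 2:
--         entries = []
--         for i in range(size):
--             for j in range(size):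
--                 if table[i][j] != 0:
--                     entries.append(f"{table[i][j]} if a={i},b={j}")
--         return "0 except " + "; ".join(entries)
--
--     return str(table)
-- ===== SOURCE B (Python) =====
-- def describe_magma(table: list[list[int]]) -> str:
--     """Single pass over all cells: maintain one boolean flag per candidate rule
--     plus the nonzero count and the sparse-entry list, then return by priority."""
--     size = len(table)
--     first = table[0][0] if size else 0
--     const = left = right = addm = shl = shr = mul = mx = mn = True
--     nonzero = 0
--     entries = []
--     for i in range(size):
--         row = table[i]
--         for j in range(size):
--             v = row[j]
--             if v != first:
--                 const = False
--             if v != i: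
--                 left = False
--             if v != j:
--                 right = False
--             if v != (i + j) % size:
--                 addm = False
--             if v != (i + 1) % size:
--                 shl = False
--             if v != (j + 1) % size:
--                 shr = False
--             if v != (i * j) % size:
--                 mul = False
--             if v != max(i, j):
--                 mx = False
--             if v != min(i, j):
--                 mn = False
--             if v != 0:
--                 nonzero += 1
--                 entries.append(f"{v} if a={i},b={j}")
--     if size and const:
--         return f"a*b = {first}"
--     if left:
--         return "a*b = a"
--     if right:
--         return "a*b = b"
--     if addm:
--         return f"a*b = (a+b) mod {size}"
--     if shl:
--         return f"a*b = (a+1) mod {size} [T3L]"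
--     if shr:
--         return f"a*b = (b+1) mod {size} [T3R]"
--     if mul:
--         return f"a*b = a×b mod {size}"
--     if size == 2 and table == [[0, 1], [1, 0]]:
--         return "a*b = a XOR b"
--     if mx:
--         return "a*b = max(a,b)"
--     if mn:
--         return "a*b = min(a,b)"
--     if nonzero <= 2:
--         return "0 except " + "; ".join(entries)
--     return str(table)
-- ===== Notes on version B (the rewrite author's own statement) =====
-- stated objective: alternative
-- what changed: Replaces A's ~10 separate full-table scans (one per candidate rule, plus a set build, a count pass and an entries pass) by a single nested loop over the cells that maintains one boolean flag per rule together with the nonzero counter and the sparse-entry list, returning afterwards in A's exact priority order.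
import Mathlib
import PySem

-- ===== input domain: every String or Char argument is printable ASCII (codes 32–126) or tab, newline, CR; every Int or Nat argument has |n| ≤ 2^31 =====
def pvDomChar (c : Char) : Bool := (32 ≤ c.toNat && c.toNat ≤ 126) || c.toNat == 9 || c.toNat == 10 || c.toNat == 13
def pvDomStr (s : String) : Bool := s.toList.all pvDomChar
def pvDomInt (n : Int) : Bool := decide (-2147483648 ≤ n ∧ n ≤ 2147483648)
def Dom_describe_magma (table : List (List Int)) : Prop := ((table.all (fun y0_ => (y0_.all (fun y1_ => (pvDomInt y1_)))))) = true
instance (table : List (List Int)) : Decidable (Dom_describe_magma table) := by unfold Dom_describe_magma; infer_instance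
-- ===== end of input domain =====

-- B replaces A's ~10 separate full-table scans by one pass over the cells maintaining a flag
-- per candidate rule plus the nonzero counter and sparse-entry list (objective: alternative).

-- ===== PORT A =====
-- table[i][j] (both Pythons read cells the same way; default never reached inside Pre_)
def pvCell (table : List (List Int)) (i j : Int) : Int :=
  PySem.List.pyGetD (PySem.List.pyGetD table i []) j 0

-- f"{v} if a={i},b={j}"
def pvEntry (v i j : Int) : String :=
  PySem.Int.toStr v ++ " if a=" ++ PySem.Int.toStr i ++ ",b=" ++ PySem.Int.toStr j

-- str(row) / str(table)
def pvReprRow (row : List Int) : String :=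
  "[" ++ PySem.Str.join ", " (row.map PySem.Int.toStr) ++ "]"
def pvReprTable (t : List (List Int)) : String :=
  "[" ++ PySem.Str.join ", " (t.map pvReprRow) ++ "]"

-- [table[i][j] for i in range(size) for j in range(size)]
def pvFlat (table : List (List Int)) (n : Int) : List Int :=
  (PySem.List.pyRange 0 n 1).flatMap
    (fun i => (PySem.List.pyRange 0 n 1).map (fun j => pvCell table i j))

-- all(p(i, j, table[i][j]) for i in range(size) for j in range(size))
def pvAllCells (table : List (List Int)) (n : Int) (p : Int → Int → Int → Bool) : Bool :=
  (PySem.List.pyRange 0 n 1).all (fun i =>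
    (PySem.List.pyRange 0 n 1).all (fun j => p i j (pvCell table i j)))

def describe_magma (table : List (List Int)) : String :=
  let n : Int := PySem.List.len table
  let flat : List Int := pvFlat table n
  if (PySem.Set.ofList flat).length == 1 then
    "a*b = " ++ PySem.Int.toStr (PySem.List.pyGetD flat 0 0)
  else if pvAllCells table n (fun i _ v => v == i) then "a*b = a"
  else if pvAllCells table n (fun _ j v => v == j) then "a*b = b"
  else if pvAllCells table n (fun i j v => v == PySem.Int.mod (i + j) n) then
    "a*b = (a+b) mod " ++ PySem.Int.toStr n
  else if pvAllCells table n (fun i _ v => v == PySem.Int.mod (i + 1) n) then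
    "a*b = (a+1) mod " ++ PySem.Int.toStr n ++ " [T3L]"
  else if pvAllCells table n (fun _ j v => v == PySem.Int.mod (j + 1) n) then
    "a*b = (b+1) mod " ++ PySem.Int.toStr n ++ " [T3R]"
  else if pvAllCells table n (fun i j v => v == PySem.Int.mod (i * j) n) then
    "a*b = a×b mod " ++ PySem.Int.toStr n
  else if n == 2 && table == [[0, 1], [1, 0]] then "a*b = a XOR b"
  else if pvAllCells table n (fun i j v => v == max i j) then "a*b = max(a,b)"
  else if pvAllCells table n (fun i j v => v == min i j) then "a*b = min(a,b)"
  else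
    let nonzero : Int := (PySem.List.pyRange 0 n 1).foldl (fun acc i =>
        (PySem.List.pyRange 0 n 1).foldl (fun acc j =>
          if pvCell table i j != 0 then acc + 1 else acc) acc) 0
    if nonzero ≤ 2 then
      let entries : List String := (PySem.List.pyRange 0 n 1).foldl (fun es i =>
          (PySem.List.pyRange 0 n 1).foldl (fun es j =>
            if pvCell table i j != 0 then es ++ [pvEntry (pvCell table i j) i j] else es) es)
          ([] : List String)
      "0 except " ++ PySem.Str.join "; " entries
    else pvReprTable table

-- ===== PORT B =====
structure MState where
  const : Bool
  left : Bool
  right : Bool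
  addm : Bool
  shl : Bool
  shr : Bool
  mul : Bool
  mx : Bool
  mn : Bool
  nonzero : Int
  entries : List String

-- the body of B's inner loop for one cell value v at (i, j)
def pvStep (n first i j : Int) (s : MState) (v : Int) : MState :=
  { const := s.const && (v == first)
    left := s.left && (v == i)
    right := s.right && (v == j)
    addm := s.addm && (v == PySem.Int.mod (i + j) n)
    shl := s.shl && (v == PySem.Int.mod (i + 1) n)
    shr := s.shr && (v == PySem.Int.mod (j + 1) n)
    mul := s.mul && (v == PySem.Int.mod (i * j) n)
    mx := s.mx && (v == max i j)
    mn := s.mn && (v == min i j)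
    nonzero := s.nonzero + (if v != 0 then 1 else 0)
    entries := s.entries ++ (if v != 0 then [pvEntry v i j] else []) }

def pvInit : MState := ⟨true, true, true, true, true, true, true, true, true, 0, []⟩

-- B's single nested pass over the cells
def pvLoop (table : List (List Int)) (n first : Int) : MState :=
  (PySem.List.pyRange 0 n 1).foldl (fun s i =>
    (PySem.List.pyRange 0 n 1).foldl (fun s j =>
      pvStep n first i j s (pvCell table i j)) s) pvInit

def describe_magma_alt (table : List (List Int)) : String :=
  let n : Int := PySem.List.len table
  let first : Int := if 0 < n then pvCell table 0 0 else 0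
  let s : MState := pvLoop table n first
  if decide (0 < n) && s.const then "a*b = " ++ PySem.Int.toStr first
  else if s.left then "a*b = a"
  else if s.right then "a*b = b"
  else if s.addm then "a*b = (a+b) mod " ++ PySem.Int.toStr n
  else if s.shl then "a*b = (a+1) mod " ++ PySem.Int.toStr n ++ " [T3L]"
  else if s.shr then "a*b = (b+1) mod " ++ PySem.Int.toStr n ++ " [T3R]"
  else if s.mul then "a*b = a×b mod " ++ PySem.Int.toStr n
  else if n == 2 && table == [[0, 1], [1, 0]] then "a*b = a XOR b"
  else if s.mx then "a*b = max(a,b)"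
  else if s.mn then "a*b = min(a,b)"
  else if s.nonzero ≤ 2 then "0 except " ++ PySem.Str.join "; " s.entries
  else pvReprTable table

-- ===== PRECONDITION & SPEC =====
-- Pre_ excludes exactly the inputs on which A raises IndexError: a row shorter than the table.
def Pre_describe_magma (table : List (List Int)) : Prop :=
  ∀ row ∈ table, table.length ≤ row.length
instance (table : List (List Int)) : Decidable (Pre_describe_magma table) := by
  unfold Pre_describe_magma; infer_instance
def pvWitness_describe_magma : List (List Int) := [[0, 1], [1, 0]]

def Spec_describe_magma (table : List (List Int)) (out : String) : Prop := out = describe_magma_alt table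
instance (table : List (List Int)) (out : String) : Decidable (Spec_describe_magma table out) := by unfold Spec_describe_magma; infer_instance

-- ===== CLAIM (what is proved, stated in full; the proofs are below) =====
def Claim_equal_describe_magma : Prop := ∀ (table : List (List Int)), Dom_describe_magma table → Pre_describe_magma table → Spec_describe_magma table (describe_magma table)

-- ===== LEMMAS AND PROOFS =====

-- generic projection lemmas for a fold whose step updates one component pointwise
theorem foldl_proj_and {σ α : Type} (st : σ → α → σ) (g : σ → Bool) (f : α → Bool)
    (h : ∀ s c, g (st s c) = (g s && f c)) :
    ∀ (l : List α) (s : σ), g (l.foldl st s) = (g s && l.all f) := by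
  intro l
  induction l with
  | nil => intro s; simp
  | cons c t ih => intro s; simp [List.foldl_cons, ih, h, Bool.and_assoc]

theorem foldl_proj_add {σ α : Type} (st : σ → α → σ) (g : σ → Int) (w : α → Int)
    (h : ∀ s c, g (st s c) = g s + w c) :
    ∀ (l : List α) (s : σ), g (l.foldl st s) = g s + (l.map w).sum := by
  intro l
  induction l with
  | nil => intro s; simp
  | cons c t ih => intro s; simp [List.foldl_cons, ih, h]; ring

theorem foldl_proj_append {σ α β : Type} (st : σ → α → σ) (g : σ → List β) (w : α → List β)
    (h : ∀ s c, g (st s c) = g s ++ w c) :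
    ∀ (l : List α) (s : σ), g (l.foldl st s) = g s ++ l.flatMap w := by
  intro l
  induction l with
  | nil => intro s; simp
  | cons c t ih => intro s; simp [List.foldl_cons, ih, h]

-- each boolean flag of the pass equals the corresponding full-table check
theorem pvLoop_proj_and (table : List (List Int)) (n first : Int)
    (g : MState → Bool) (f : Int → Int → Int → Bool)
    (hstep : ∀ s i j v, g (pvStep n first i j s v) = (g s && f i j v))
    (hinit : g pvInit = true) :
    g (pvLoop table n first) = pvAllCells table n f := by
  unfold pvLoop pvAllCells
  rw [foldl_proj_and _ g
        (fun i => (PySem.List.pyRange 0 n 1).all (fun j => f i j (pvCell table i j)))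
        (fun s i => foldl_proj_and _ g (fun j => f i j (pvCell table i j))
          (fun s j => hstep s i j _) _ s)]
  simp [hinit]

theorem pvLoop_left (table : List (List Int)) (n first : Int) :
    (pvLoop table n first).left = pvAllCells table n (fun i _ v => v == i) :=
  pvLoop_proj_and _ _ _ _ _ (fun _ _ _ _ => rfl) rfl

theorem pvLoop_right (table : List (List Int)) (n first : Int) :
    (pvLoop table n first).right = pvAllCells table n (fun _ j v => v == j) :=
  pvLoop_proj_and _ _ _ _ _ (fun _ _ _ _ => rfl) rfl

theorem pvLoop_addm (table : List (List Int)) (n first : Int) :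
    (pvLoop table n first).addm = pvAllCells table n (fun i j v => v == PySem.Int.mod (i + j) n) :=
  pvLoop_proj_and _ _ _ _ _ (fun _ _ _ _ => rfl) rfl

theorem pvLoop_shl (table : List (List Int)) (n first : Int) :
    (pvLoop table n first).shl = pvAllCells table n (fun i _ v => v == PySem.Int.mod (i + 1) n) :=
  pvLoop_proj_and _ _ _ _ _ (fun _ _ _ _ => rfl) rfl

theorem pvLoop_shr (table : List (List Int)) (n first : Int) :
    (pvLoop table n first).shr = pvAllCells table n (fun _ j v => v == PySem.Int.mod (j + 1) n) :=
  pvLoop_proj_and _ _ _ _ _ (fun _ _ _ _ => rfl) rfl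

theorem pvLoop_mul (table : List (List Int)) (n first : Int) :
    (pvLoop table n first).mul = pvAllCells table n (fun i j v => v == PySem.Int.mod (i * j) n) :=
  pvLoop_proj_and _ _ _ _ _ (fun _ _ _ _ => rfl) rfl

theorem pvLoop_mx (table : List (List Int)) (n first : Int) :
    (pvLoop table n first).mx = pvAllCells table n (fun i j v => v == max i j) :=
  pvLoop_proj_and _ _ _ _ _ (fun _ _ _ _ => rfl) rfl

theorem pvLoop_mn (table : List (List Int)) (n first : Int) :
    (pvLoop table n first).mn = pvAllCells table n (fun i j v => v == min i j) :=
  pvLoop_proj_and _ _ _ _ _ (fun _ _ _ _ => rfl) rfl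

theorem pvLoop_const (table : List (List Int)) (n first : Int) :
    (pvLoop table n first).const = pvAllCells table n (fun _ _ v => v == first) :=
  pvLoop_proj_and _ _ _ _ _ (fun _ _ _ _ => rfl) rfl

-- B's counter equals A's nested counting fold
theorem pvLoop_nonzero (table : List (List Int)) (n first : Int) :
    (pvLoop table n first).nonzero =
      (PySem.List.pyRange 0 n 1).foldl (fun acc i =>
        (PySem.List.pyRange 0 n 1).foldl (fun acc j =>
          if pvCell table i j != 0 then acc + 1 else acc) acc) 0 := by
  unfold pvLoop
  rw [foldl_proj_add _ (fun s : MState => s.nonzero)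
        (fun i => ((PySem.List.pyRange 0 n 1).map
          (fun j => if pvCell table i j != 0 then (1 : Int) else 0)).sum)
        (fun s i => foldl_proj_add _ (fun s : MState => s.nonzero)
          (fun j => if pvCell table i j != 0 then (1 : Int) else 0)
          (fun s j => rfl) _ s)]
  have hr : ((PySem.List.pyRange 0 n 1).foldl (fun acc i =>
        (PySem.List.pyRange 0 n 1).foldl (fun acc j =>
          if pvCell table i j != 0 then acc + 1 else acc) acc) 0)
      = (0 : Int) + ((PySem.List.pyRange 0 n 1).map
          (fun i => ((PySem.List.pyRange 0 n 1).map
            (fun j => if pvCell table i j != 0 then (1 : Int) else 0)).sum)).sum :=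
    foldl_proj_add _ (fun x : Int => x)
      (fun i => ((PySem.List.pyRange 0 n 1).map
        (fun j => if pvCell table i j != 0 then (1 : Int) else 0)).sum)
      (fun s i => foldl_proj_add _ (fun x : Int => x)
        (fun j => if pvCell table i j != 0 then (1 : Int) else 0)
        (fun s j => by by_cases h : (pvCell table i j != 0) = true <;> simp [h]) _ s) _ 0
  rw [hr]
  rfl

-- B's entry list equals A's nested appending fold
theorem pvLoop_entries (table : List (List Int)) (n first : Int) :
    (pvLoop table n first).entries =
      (PySem.List.pyRange 0 n 1).foldl (fun es i =>
        (PySem.List.pyRange 0 n 1).foldl (fun es j =>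
          if pvCell table i j != 0 then es ++ [pvEntry (pvCell table i j) i j] else es) es)
        ([] : List String) := by
  unfold pvLoop
  rw [foldl_proj_append _ (fun s : MState => s.entries)
        (fun i => (PySem.List.pyRange 0 n 1).flatMap
          (fun j => if pvCell table i j != 0 then [pvEntry (pvCell table i j) i j] else []))
        (fun s i => foldl_proj_append _ (fun s : MState => s.entries)
          (fun j => if pvCell table i j != 0 then [pvEntry (pvCell table i j) i j] else [])
          (fun s j => rfl) _ s)]
  have hr : ((PySem.List.pyRange 0 n 1).foldl (fun es i =>
        (PySem.List.pyRange 0 n 1).foldl (fun es j =>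
          if pvCell table i j != 0 then es ++ [pvEntry (pvCell table i j) i j] else es) es)
        ([] : List String))
      = ([] : List String) ++ (PySem.List.pyRange 0 n 1).flatMap
          (fun i => (PySem.List.pyRange 0 n 1).flatMap
            (fun j => if pvCell table i j != 0 then [pvEntry (pvCell table i j) i j] else [])) :=
    foldl_proj_append _ (fun x : List String => x)
      (fun i => (PySem.List.pyRange 0 n 1).flatMap
        (fun j => if pvCell table i j != 0 then [pvEntry (pvCell table i j) i j] else []))
      (fun s i => foldl_proj_append _ (fun x : List String => x)
        (fun j => if pvCell table i j != 0 then [pvEntry (pvCell table i j) i j] else [])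
        (fun s j => by by_cases h : (pvCell table i j != 0) = true <;> simp [h]) _ s) _ []
  rw [hr]
  rfl

theorem nodup_all_eq (s : List Int) (a : Int) (hn : s.Nodup) (hmem : a ∈ s)
    (hall : ∀ x ∈ s, x = a) : s = [a] := by
  cases s with
  | nil => cases hmem
  | cons b t =>
    have hb : b = a := hall b (by simp)
    have ht : t = [] := by
      rw [List.eq_nil_iff_forall_not_mem]
      intro x hx
      have hxa : x = a := hall x (by simp [hx])
      have hbt : b ∉ t := (List.nodup_cons.mp hn).1
      exact hbt (by rw [hb, ← hxa] at *; exact hx)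
    rw [hb, ht]

theorem set_len_one_iff (l : List Int) (a : Int) (ha : a ∈ l) :
    ((PySem.Set.ofList l).length = 1) ↔ (∀ x ∈ l, x = a) := by
  constructor
  · intro h x hx
    cases hsl : PySem.Set.ofList l with
    | nil => rw [hsl] at h; simp at h
    | cons b t =>
      have ht : t = [] := by
        rw [hsl] at h; simpa using h
      have hx' : x ∈ PySem.Set.ofList l := by rw [PySem.Set.mem_ofList]; exact hx
      have ha' : a ∈ PySem.Set.ofList l := by rw [PySem.Set.mem_ofList]; exact ha
      rw [hsl, ht] at hx' ha'
      simp at hx' ha'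
      rw [hx', ha']
  · intro h
    rw [nodup_all_eq (PySem.Set.ofList l) a (PySem.Set.nodup_ofList l)
      (by rw [PySem.Set.mem_ofList]; exact ha) (fun x hx => h x (by rw [PySem.Set.mem_ofList] at hx; exact hx))]
    rfl

theorem pvFlat_cons (table : List (List Int)) (n : Int) (hn : 0 < n) :
    pvFlat table n = pvCell table 0 0 ::
      ((PySem.List.pyRange 1 n 1).map (fun j => pvCell table 0 j) ++
        (PySem.List.pyRange 1 n 1).flatMap
          (fun i => (PySem.List.pyRange 0 n 1).map (fun j => pvCell table i j))) := by
  unfold pvFlat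
  rw [PySem.List.pyRange_one_cons hn]
  simp

theorem pyGetD_pvFlat_zero (table : List (List Int)) (n : Int) (hn : 0 < n) :
    PySem.List.pyGetD (pvFlat table n) 0 0 = pvCell table 0 0 := by
  rw [pvFlat_cons table n hn]
  simp [pysem]

theorem const_cond (table : List (List Int)) (n : Int) (hn : 0 < n) :
    ((PySem.Set.ofList (pvFlat table n)).length == 1)
      = pvAllCells table n (fun _ _ v => v == pvCell table 0 0) := by
  have hmem : pvCell table 0 0 ∈ pvFlat table n := by
    rw [pvFlat_cons table n hn]; simp
  have h := set_len_one_iff (pvFlat table n) (pvCell table 0 0) hmem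
  rw [Bool.eq_iff_iff]
  simp only [beq_iff_eq, h]
  unfold pvAllCells pvFlat
  simp only [List.all_eq_true, List.mem_flatMap, List.mem_map, beq_iff_eq]
  constructor
  · intro hh i hi j hj
    exact hh _ ⟨i, hi, j, hj, rfl⟩
  · rintro hh x ⟨i, hi, j, hj, rfl⟩
    exact hh i hi j hj

-- ===== VERDICT (by name: the statement is the Claim_ definition above) =====
theorem describe_magma_spec : Claim_equal_describe_magma := by
  intro table _ _
  unfold Spec_describe_magma
  cases table with
  | nil => decide
  | cons r rest =>
    have hn : (0 : Int) < PySem.List.len (r :: rest) := by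
      simp [PySem.List.len_eq]
    unfold describe_magma describe_magma_alt
    simp only [if_pos hn, decide_eq_true hn, Bool.true_and,
      pvLoop_left, pvLoop_right, pvLoop_addm, pvLoop_shl, pvLoop_shr, pvLoop_mul,
      pvLoop_mx, pvLoop_mn, pvLoop_const, pvLoop_nonzero, pvLoop_entries,
      const_cond (r :: rest) _ hn, pyGetD_pvFlat_zero (r :: rest) _ hn]
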